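-- pv_equiv track=rewrite | github.com/weak-head/leetcode | leetcode/p0616_add_bold_tag_in_string.py | addBoldTag1
-- ===== SOURCE A (Python) =====
-- from typing import List
--
-- def addBoldTag1(s: str, dict: List[str]) -> str:
--     """
--     Time: O(m * n)
--         m - number of words in dict
--         n - total length of the string
--     Space: O()
--     """
--     bold = [False] * len(s)
--
--     for word in dict:
--         start = s.find(word)
--         while start != -1:
--             for i in range(start, len(word) + start):
--                 bold[i] = True
--             start = s.find(word, start + 1)
--
--     output = []
--
--     i = 0
--     while i < len(s):
--         if bold[i]:
--             output.append("<b>")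
--             while i < len(s) and bold[i]:
--                 output.append(s[i])
--                 i += 1
--             output.append("</b>")
--         else:
--             output.append(s[i])
--             i += 1
--
--     return "".join(output)
-- ===== SOURCE B (Python) =====
-- from typing import List
--
-- def addBoldTag1(s: str, dict: List[str]) -> str:
--     # One forward pass: at each position check every word with startswith and
--     # extend a running bold horizon; then emit tags from the bold mask using
--     # neighbour comparisons instead of an inner run-consuming loop.
--     n = len(s)
--     bold = []
--     end = 0
--     for i in range(n):
--         for w in dict:
--             if s.startswith(w, i):
--                 end = max(end, i + len(w))
--         bold.append(i < end)
--     out = []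
--     for i in range(n):
--         if bold[i] and (i == 0 or not bold[i - 1]):
--             out.append("<b>")
--         out.append(s[i])
--         if bold[i] and (i + 1 == n or not bold[i + 1]):
--             out.append("</b>")
--     return "".join(out)
-- ===== Notes on version B (the rewrite author's own statement) =====
-- stated objective: alternative
-- what changed: replaces per-word repeated str.find scans plus a run-consuming nested while render by a single forward pass that extends a running bold horizon via startswith at each position, rendering tags from neighbour comparisons on the bold mask
import Mathlib
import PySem

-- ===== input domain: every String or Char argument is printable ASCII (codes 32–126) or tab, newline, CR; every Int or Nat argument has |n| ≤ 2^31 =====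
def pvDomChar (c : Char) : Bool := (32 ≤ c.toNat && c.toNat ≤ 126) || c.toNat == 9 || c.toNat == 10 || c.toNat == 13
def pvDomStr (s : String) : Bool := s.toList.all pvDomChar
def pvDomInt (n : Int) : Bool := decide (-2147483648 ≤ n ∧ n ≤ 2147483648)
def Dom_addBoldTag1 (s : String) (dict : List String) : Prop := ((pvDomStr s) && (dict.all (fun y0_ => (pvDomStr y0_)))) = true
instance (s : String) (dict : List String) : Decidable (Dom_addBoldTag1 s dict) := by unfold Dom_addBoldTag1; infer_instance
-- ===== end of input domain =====

-- ===== PORT A =====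
-- B changes the matching pass (running bold horizon via startswith instead of repeated find)
-- and the rendering pass (neighbour comparisons instead of a nested run-consuming while).

-- for word in dict: start = s.find(word); while start != -1: mark range; start = s.find(word, start+1)
-- inner marking loop: for i in range(start, len(word)+start): bold[i] = True
def pvMarkRangeA (bold : List Bool) (start : Int) (wlen : Int) : List Bool :=
  (PySem.List.pyRange start (wlen + start)).foldl (fun acc i => acc.set i.toNat true) bold

-- the while-loop on find results; fuel n+2 always suffices (find results strictly increase, <= n)
def pvMarkLoopA (cs w : List Char) (fuel : Nat) (bold : List Bool) (start : Int) : List Bool :=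
  match fuel with
  | 0 => bold
  | fuel + 1 =>
    if start = -1 then bold
    else pvMarkLoopA cs w fuel (pvMarkRangeA bold start (w.length : Int))
           (PySem.Chars.findFrom cs w (start + 1) none)

-- inner while: while i < len(s) and bold[i]: output.append(s[i]); i += 1
def pvInnerA (cs : List Char) (bold : List Bool) (n i : Nat) : List Char × Nat :=
  if h : i < n ∧ bold.getD i false = true then
    let r := pvInnerA cs bold n (i + 1)
    (cs.getD i ' ' :: r.1, r.2)
  else ([], i)
termination_by n - i
decreasing_by omega

theorem le_pvInnerA_snd (cs : List Char) (bold : List Bool) (n : Nat) :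
    ∀ i, i ≤ (pvInnerA cs bold n i).2 := by
  intro i
  fun_induction pvInnerA with
  | case1 i h r ih => exact le_trans (by omega) ih
  | case2 i h => simp

theorem lt_pvInnerA_snd (cs : List Char) (bold : List Bool) (n i : Nat)
    (h : i < n ∧ bold.getD i false = true) : i < (pvInnerA cs bold n i).2 := by
  rw [pvInnerA, dif_pos h]
  have := le_pvInnerA_snd cs bold n (i + 1)
  simpa using by omega

-- outer while over the string, emitting <b> … </b> around each bold run
def pvOutA (cs : List Char) (bold : List Bool) (n i : Nat) : List Char :=
  if h : i < n then
    if hb : bold.getD i false = true then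
      let r := pvInnerA cs bold n i
      '<' :: 'b' :: '>' :: (r.1 ++ '<' :: '/' :: 'b' :: '>' :: pvOutA cs bold n r.2)
    else cs.getD i ' ' :: pvOutA cs bold n (i + 1)
  else []
termination_by n - i
decreasing_by
  · exact Nat.sub_lt_sub_left h (lt_pvInnerA_snd cs bold n i ⟨h, hb⟩)
  · omega

def addBoldTag1 (s : String) (dict : List String) : String :=
  let cs := s.toList
  let n := cs.length
  let bold := dict.foldl
    (fun b w => pvMarkLoopA cs w.toList (n + 2) b (PySem.Chars.find cs w.toList))
    (List.replicate n false)
  String.ofList (pvOutA cs bold n 0)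

-- ===== PORT B =====
-- bold pass: for i in range(n): for w in dict: if s.startswith(w, i): end = max(end, i+len(w)); bold.append(i < end)
-- (s.startswith(w, i) with 0 <= i <= len(s) is exactly startswith of s[i:])
def pvBoldStepB (cs : List Char) (dict : List String) (n : Nat) : List Bool :=
  ((PySem.List.pyRange 0 (n : Int)).foldl
    (fun (acc : List Bool × Nat) i =>
      let e := dict.foldl
        (fun e w => if PySem.Chars.startswith (cs.drop i.toNat) w.toList
                    then max e (i.toNat + w.toList.length) else e) acc.2
      (acc.1 ++ [decide (i.toNat < e)], e))
    ([], 0)).1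

-- render pass: open before a char whose left neighbour is not bold, close after one whose right neighbour is not bold
def pvRenderB (cs : List Char) (bold : List Bool) (n : Nat) : List Char :=
  (PySem.List.pyRange 0 (n : Int)).foldl
    (fun acc i =>
      let acc := if bold.getD i.toNat false && (decide (i = 0) || !bold.getD (i.toNat - 1) false)
                 then acc ++ ['<', 'b', '>'] else acc
      let acc := acc ++ [cs.getD i.toNat ' ']
      if bold.getD i.toNat false && (decide (i + 1 = (n : Int)) || !bold.getD (i.toNat + 1) false)
      then acc ++ ['<', '/', 'b', '>'] else acc)
    []

def addBoldTag1_alt (s : String) (dict : List String) : String :=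
  let cs := s.toList
  let n := cs.length
  let bold := pvBoldStepB cs dict n
  String.ofList (pvRenderB cs bold n)

-- ===== PRECONDITION & SPEC =====
def Spec_addBoldTag1 (s : String) (dict : List String) (out : String) : Prop := out = addBoldTag1_alt s dict
instance (s : String) (dict : List String) (out : String) : Decidable (Spec_addBoldTag1 s dict out) := by unfold Spec_addBoldTag1; infer_instance

-- ===== CLAIM (what is proved, stated in full; the proofs are below) =====
def Claim_equal_addBoldTag1 : Prop := ∀ (s : String) (dict : List String), Dom_addBoldTag1 s dict → Spec_addBoldTag1 s dict (addBoldTag1 s dict)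

-- ===== LEMMAS AND PROOFS =====

-- proof-only helper definitions

def pvCovB (cs w : List Char) (k j : Nat) : Bool :=
  (List.range (j + 1)).any
    (fun p => decide (k ≤ p) && PySem.Chars.startswith (cs.drop p) w && decide (j < p + w.length))

def pvCoverB (cs : List Char) (dict : List String) (j : Nat) : Bool :=
  dict.any (fun w => pvCovB cs w.toList 0 j)

def pvSpecBold (cs : List Char) (dict : List String) : List Bool :=
  (List.range cs.length).map (fun j => pvCoverB cs dict j)

def pvRef (prev : Bool) : List (Bool × Char) → List Char
  | [] => if prev then ['<', '/', 'b', '>'] else []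
  | (b, c) :: rest =>
    if b then (if prev then c :: pvRef true rest else '<' :: 'b' :: '>' :: c :: pvRef true rest)
    else (if prev then '<' :: '/' :: 'b' :: '>' :: c :: pvRef false rest else c :: pvRef false rest)

def pvPiece (cs : List Char) (bold : List Bool) (n i : Nat) : List Char :=
  (if bold.getD i false && (decide (i = 0) || !bold.getD (i - 1) false) then ['<', 'b', '>'] else [])
  ++ [cs.getD i ' ']
  ++ (if bold.getD i false && (decide (i + 1 = n) || !bold.getD (i + 1) false) then ['<', '/', 'b', '>'] else [])

def pvPrev (bold : List Bool) (i : Nat) : Bool :=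
  decide (i ≠ 0) && bold.getD (i - 1) false

def pvEF (cs : List Char) (dict : List String) (m : Nat) : Nat :=
  (List.range m).foldl
    (fun e i => dict.foldl
      (fun e w => if PySem.Chars.startswith (cs.drop i) w.toList
                  then max e (i + w.toList.length) else e) e) 0

-- ===== A-side bold characterization =====

theorem foldl_set_length (L : List Int) : ∀ (acc : List Bool),
    (L.foldl (fun acc i => acc.set i.toNat true) acc).length = acc.length := by
  induction L with
  | nil => intro acc; rfl
  | cons x xs ih => intro acc; rw [List.foldl_cons, ih, List.length_set]

theorem len_markRange (bold : List Bool) (a l : Int) :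
    (pvMarkRangeA bold a l).length = bold.length := by
  unfold pvMarkRangeA; exact foldl_set_length _ bold

theorem len_markLoop (cs w : List Char) (f : Nat) :
    ∀ (bold : List Bool) (st : Int), (pvMarkLoopA cs w f bold st).length = bold.length := by
  induction f with
  | zero => intro bold st; rfl
  | succ f ih =>
    intro bold st
    rw [pvMarkLoopA]
    split
    · rfl
    · rw [ih, len_markRange]

theorem getD_set_of_ne_aux {l : List Bool} {i j : Nat} {b : Bool} (h : i ≠ j) :
    (l.set i b).getD j false = l.getD j false := by
  simp [List.getD_eq_getElem?_getD, List.getElem?_set_ne h]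

theorem markRange_getD_aux (bold : List Bool) (a l : Nat) (h : a + l ≤ bold.length) (j : Nat) :
    ((PySem.List.pyRange (a : Int) ((l : Int) + (a : Int))).foldl
        (fun acc i => acc.set i.toNat true) bold).getD j false
      = (bold.getD j false || decide (a ≤ j ∧ j < a + l)) := by
  induction l with
  | zero =>
    have h0 : PySem.List.pyRange (a : Int) (((0:Nat) : Int) + a) = [] := by
      norm_num
    rw [h0]
    simp only [List.foldl_nil]
    simp
  | succ l ih =>
    have hr : PySem.List.pyRange (a : Int) ((((l+1):Nat) : Int) + a)
        = PySem.List.pyRange (a : Int) (((l:Nat) : Int) + a) ++ [((l:Nat) : Int) + a] := by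
      push_cast
      rw [show ((l:Int) + 1 + a) = ((l:Int) + a) + 1 by ring]
      exact PySem.List.pyRange_one_succ_right (by omega)
    rw [hr, List.foldl_append]
    simp only [List.foldl_cons, List.foldl_nil]
    have hlen : (List.foldl (fun acc i => acc.set i.toNat true) bold
        (PySem.List.pyRange (a : Int) (((l:Nat) : Int) + a))).length = bold.length :=
      foldl_set_length _ bold
    have htn : (((l:Nat) : Int) + a).toNat = l + a := by omega
    rw [htn]
    rcases Nat.lt_trichotomy j (l + a) with hj | rfl | hj
    · rw [getD_set_of_ne_aux (by omega : l + a ≠ j), ih (by omega)]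
      have h1 : (a ≤ j ∧ j < a + l) ↔ (a ≤ j ∧ j < a + (l+1)) := by omega
      simp [h1]
    · have hs : ((List.foldl (fun acc i => acc.set i.toNat true) bold
          (PySem.List.pyRange (a : Int) (((l:Nat) : Int) + a))).set (l + a) true).getD (l + a) false = true := by
        have hlt : l + a < (List.foldl (fun acc i => acc.set i.toNat true) bold
            (PySem.List.pyRange (a : Int) (((l:Nat) : Int) + a))).length := by
          rw [hlen]; omega
        simp [List.getD_eq_getElem?_getD, List.getElem?_set_self hlt]
      rw [hs]
      have h1 : a ≤ l + a ∧ l + a < a + (l + 1) := by omega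
      simp [h1]
    · rw [getD_set_of_ne_aux (by omega : l + a ≠ j), ih (by omega)]
      have h1 : ¬(a ≤ j ∧ j < a + l) := by omega
      have h2 : ¬(a ≤ j ∧ j < a + (l+1)) := by omega
      simp [h1, h2]

theorem markRange_getD (bold : List Bool) (a l : Nat) (h : a + l ≤ bold.length) (j : Nat) :
    (pvMarkRangeA bold (a : Int) (l : Int)).getD j false
      = (bold.getD j false || decide (a ≤ j ∧ j < a + l)) := by
  unfold pvMarkRangeA
  exact markRange_getD_aux bold a l h j

theorem covB_iff (cs w : List Char) (k j : Nat) :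
    pvCovB cs w k j = true ↔ ∃ p, k ≤ p ∧ p ≤ j ∧ j < p + w.length ∧ w <+: cs.drop p := by
  unfold pvCovB
  simp only [List.any_eq_true, List.mem_range, Bool.and_eq_true, decide_eq_true_eq,
    PySem.Chars.startswith_iff]
  constructor
  · rintro ⟨p, hp, ⟨hk, hpre⟩, hj⟩
    exact ⟨p, hk, by omega, hj, hpre⟩
  · rintro ⟨p, hk, hpj, hj, hpre⟩
    exact ⟨p, by omega, ⟨hk, hpre⟩, hj⟩

theorem findFrom_past (cs w : List Char) :
    PySem.Chars.findFrom cs w ((cs.length : Int) + 1) none = -1 := by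
  simp only [PySem.Chars.findFrom]
  rw [if_neg (show ¬((cs.length : Int) + 1 < 0) by omega)]
  rw [if_pos (show (cs.length : Int) < (cs.length : Int) + 1 by omega)]

theorem covB_nil (cs : List Char) (k j : Nat) : pvCovB cs [] k j = false := by
  rw [Bool.eq_false_iff]
  intro ht
  rcases (covB_iff cs [] k j).1 ht with ⟨p, _, hp2, hp3, _⟩
  simp at hp3
  omega

theorem markLoop_getD (cs w : List Char) :
    ∀ (fuel k : Nat) (bold : List Bool), bold.length = cs.length → k ≤ cs.length →
    cs.length + 1 - k < fuel → ∀ j, j < cs.length →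
    (pvMarkLoopA cs w fuel bold (PySem.Chars.findFrom cs w (k : Int) none)).getD j false
      = (bold.getD j false || pvCovB cs w k j) := by
  intro fuel
  induction fuel with
  | zero => intro k bold _ _ hf; omega
  | succ fuel ih =>
    intro k bold hlen hk hf j hj
    by_cases hr : PySem.Chars.findFrom cs w (k : Int) none = -1
    · simp only [pvMarkLoopA, if_pos hr]
      have hcov : pvCovB cs w k j = false := by
        rw [Bool.eq_false_iff]
        intro htrue
        rcases (covB_iff cs w k j).1 htrue with ⟨p, hkp, hpj, hjw, hpre⟩
        have hdd : cs.drop p = (cs.drop k).drop (p - k) := by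
          rw [List.drop_drop]; congr 1; omega
        have hinf : w <:+: cs.drop k :=
          (hdd ▸ hpre).isInfix.trans (List.drop_suffix _ _).isInfix
        exact ((PySem.Chars.findFrom_natCast_eq_neg_one_iff cs w k hk).1 hr) hinf
      rw [hcov, Bool.or_false]
    · obtain ⟨hkr, hpre, hmin⟩ := PySem.Chars.findFrom_natCast_spec cs w k hk hr
      set r := PySem.Chars.findFrom cs w (k : Int) none with hrdef
      have hr0 : (0 : Int) ≤ r := by omega
      have hkrn : k ≤ r.toNat := by omega
      have hwlen : w.length ≤ (cs.drop r.toNat).length := hpre.length_le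
      rw [List.length_drop] at hwlen
      have hrn_le : r.toNat ≤ cs.length := by
        by_cases hw : w = []
        · rcases Nat.lt_or_ge k r.toNat with hlt | hge
          · exact absurd (hmin k le_rfl hlt) (by simp [hw])
          · omega
        · have h1 : 1 ≤ w.length := List.length_pos_iff.2 hw
          omega
      simp only [pvMarkLoopA, if_neg hr]
      rw [show r + 1 = ((r.toNat + 1 : Nat) : Int) by omega]
      by_cases hend : r.toNat + 1 ≤ cs.length
      · rw [ih (r.toNat + 1) _ (by rw [len_markRange]; exact hlen) hend (by omega) j hj]
        have hmr : (pvMarkRangeA bold r ((w.length : Nat) : Int)).getD j false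
            = (bold.getD j false || decide (r.toNat ≤ j ∧ j < r.toNat + w.length)) := by
          have h2 := markRange_getD bold r.toNat w.length (by rw [hlen]; omega) j
          rwa [show ((r.toNat : Nat) : Int) = r by omega] at h2
        rw [hmr]
        have key : (decide (r.toNat ≤ j ∧ j < r.toNat + w.length) || pvCovB cs w (r.toNat + 1) j)
            = pvCovB cs w k j := by
          rw [Bool.eq_iff_iff]
          simp only [Bool.or_eq_true, decide_eq_true_eq, covB_iff]
          constructor
          · rintro (⟨h1, h2⟩ | ⟨p, hp1, hp2, hp3, hp4⟩)
            · exact ⟨r.toNat, hkrn, h1, h2, hpre⟩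
            · exact ⟨p, by omega, hp2, hp3, hp4⟩
          · rintro ⟨p, hp1, hp2, hp3, hp4⟩
            rcases Nat.lt_or_ge p r.toNat with hlt | hge
            · exact absurd hp4 (hmin p hp1 hlt)
            · rcases Nat.eq_or_lt_of_le hge with heq | hlt2
              · exact Or.inl ⟨heq ▸ hp2, heq ▸ hp3⟩
              · exact Or.inr ⟨p, by omega, hp2, hp3, hp4⟩
        rw [Bool.or_assoc, key]
      · have hweq : w = [] := by
          by_contra hw
          have h1 : 1 ≤ w.length := List.length_pos_iff.2 hw
          omega
        have hrn : r.toNat = cs.length := by omega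
        have hpast : PySem.Chars.findFrom cs w ((r.toNat + 1 : Nat) : Int) none = -1 := by
          have h3 := findFrom_past cs w
          rwa [show ((cs.length : Int) + 1) = ((r.toNat + 1 : Nat) : Int) by omega] at h3
        rw [hpast]
        cases fuel with
        | zero => omega
        | succ f =>
          rw [hweq]
          simp only [pvMarkLoopA]
          rw [if_pos trivial]
          have hmr := markRange_getD bold r.toNat 0 (by omega) j
          rw [show ((([] : List Char).length : Nat) : Int) = ((0 : Nat) : Int) by simp,
              show r = ((r.toNat : Nat) : Int) by omega]
          rw [hmr, covB_nil]
          simp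
  

theorem foldMark_getD (cs : List Char) :
    ∀ (ds : List String) (b : List Bool), b.length = cs.length →
    (ds.foldl (fun b w => pvMarkLoopA cs w.toList (cs.length + 2) b
        (PySem.Chars.find cs w.toList)) b).length = cs.length
    ∧ ∀ j, j < cs.length →
      (ds.foldl (fun b w => pvMarkLoopA cs w.toList (cs.length + 2) b
          (PySem.Chars.find cs w.toList)) b).getD j false
        = (b.getD j false || ds.any (fun w => pvCovB cs w.toList 0 j)) := by
  intro ds
  induction ds with
  | nil => intro b hb; exact ⟨hb, by simp⟩
  | cons x xs ih =>
    intro b hb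
    rw [List.foldl_cons]
    have hlen1 : (pvMarkLoopA cs x.toList (cs.length + 2) b
        (PySem.Chars.find cs x.toList)).length = cs.length := by
      rw [len_markLoop]; exact hb
    obtain ⟨hlen2, helem⟩ := ih _ hlen1
    refine ⟨hlen2, fun j hj => ?_⟩
    rw [helem j hj]
    have hfind : PySem.Chars.find cs x.toList
        = PySem.Chars.findFrom cs x.toList (((0 : Nat) : Int)) none := by
      rw [Nat.cast_zero, PySem.Chars.findFrom_zero]
    rw [hfind, markLoop_getD cs x.toList (cs.length + 2) 0 b hb (by omega) (by omega) j hj]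
    simp [Bool.or_assoc]

theorem boldA_eq_spec (cs : List Char) (dict : List String) :
    dict.foldl
      (fun b w => pvMarkLoopA cs w.toList (cs.length + 2) b (PySem.Chars.find cs w.toList))
      (List.replicate cs.length false) = pvSpecBold cs dict := by
  obtain ⟨hlen, helem⟩ := foldMark_getD cs dict (List.replicate cs.length false) (by simp)
  apply List.ext_getElem (by simp [hlen, pvSpecBold])
  intro j hj1 hj2
  have hjn : j < cs.length := by rwa [hlen] at hj1
  have h1 : (dict.foldl (fun b w => pvMarkLoopA cs w.toList (cs.length + 2) b
      (PySem.Chars.find cs w.toList)) (List.replicate cs.length false)).getD j false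
      = pvCoverB cs dict j := by
    rw [helem j hjn]
    simp [pvCoverB]
  rw [← List.getD_eq_getElem _ false hj1, h1]
  simp [pvSpecBold]

-- ===== B-side bold characterization =====

theorem dictE_iff (cs : List Char) (ds : List String) (i j : Nat) :
    ∀ e : Nat,
    (j < ds.foldl
      (fun e w => if PySem.Chars.startswith (cs.drop i) w.toList
                  then max e (i + w.toList.length) else e) e)
      ↔ (j < e ∨ ∃ w ∈ ds, PySem.Chars.startswith (cs.drop i) w.toList = true ∧ j < i + w.toList.length) := by
  induction ds with
  | nil => intro e; simp
  | cons x xs ih =>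
    intro e
    rw [List.foldl_cons]
    by_cases hx : PySem.Chars.startswith (cs.drop i) x.toList = true
    · rw [if_pos hx, ih]
      simp only [List.mem_cons, lt_max_iff]
      constructor
      · rintro ((h | h) | ⟨w, hw, hsw, h⟩)
        · exact Or.inl h
        · exact Or.inr ⟨x, Or.inl rfl, hx, h⟩
        · exact Or.inr ⟨w, Or.inr hw, hsw, h⟩
      · rintro (h | ⟨w, (rfl | hw), hsw, h⟩)
        · exact Or.inl (Or.inl h)
        · exact Or.inl (Or.inr h)
        · exact Or.inr ⟨w, hw, hsw, h⟩
    · rw [if_neg hx, ih]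
      simp only [List.mem_cons]
      constructor
      · rintro (h | ⟨w, hw, hsw, h⟩)
        · exact Or.inl h
        · exact Or.inr ⟨w, Or.inr hw, hsw, h⟩
      · rintro (h | ⟨w, (rfl | hw), hsw, h⟩)
        · exact Or.inl h
        · exact absurd hsw hx
        · exact Or.inr ⟨w, hw, hsw, h⟩

theorem EF_succ (cs : List Char) (dict : List String) (m : Nat) :
    pvEF cs dict (m + 1)
      = dict.foldl (fun e w => if PySem.Chars.startswith (cs.drop m) w.toList
          then max e (m + w.toList.length) else e) (pvEF cs dict m) := by
  unfold pvEF
  rw [List.range_succ, List.foldl_append, List.foldl_cons, List.foldl_nil]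

theorem EF_iff (cs : List Char) (dict : List String) (m j : Nat) :
    j < pvEF cs dict m
      ↔ ∃ p < m, ∃ w ∈ dict, PySem.Chars.startswith (cs.drop p) w.toList = true ∧ j < p + w.toList.length := by
  induction m with
  | zero => simp [pvEF]
  | succ m ih =>
    rw [EF_succ, dictE_iff, ih]
    constructor
    · rintro (⟨p, hp, hrest⟩ | ⟨w, hw, hsw, hj⟩)
      · exact ⟨p, by omega, hrest⟩
      · exact ⟨m, by omega, w, hw, hsw, hj⟩
    · rintro ⟨p, hp, w, hw, hsw, hj⟩
      rcases Nat.lt_or_ge p m with hlt | hge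
      · exact Or.inl ⟨p, hlt, w, hw, hsw, hj⟩
      · have : p = m := by omega
        exact Or.inr ⟨w, hw, this ▸ hsw, this ▸ hj⟩

theorem entry_eq_cover (cs : List Char) (dict : List String) (i : Nat) :
    decide (i < pvEF cs dict (i + 1)) = pvCoverB cs dict i := by
  rw [Bool.eq_iff_iff]
  simp only [decide_eq_true_eq, EF_iff, pvCoverB, List.any_eq_true, covB_iff,
    PySem.Chars.startswith_iff]
  constructor
  · rintro ⟨p, hp, w, hw, hsw, hj⟩
    exact ⟨w, hw, p, by omega, by omega, hj, hsw⟩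
  · rintro ⟨w, hw, p, _, hp2, hp3, hpre⟩
    exact ⟨p, by omega, w, hw, hpre, hp3⟩

theorem foldB_pair (cs : List Char) (dict : List String) (m : Nat) :
    (List.range m).foldl
      (fun (acc : List Bool × Nat) (i : Nat) =>
        let e := dict.foldl
          (fun e w => if PySem.Chars.startswith (cs.drop i) w.toList
                      then max e (i + w.toList.length) else e) acc.2
        (acc.1 ++ [decide (i < e)], e))
      ([], 0)
      = ((List.range m).map (fun i => decide (i < pvEF cs dict (i + 1))), pvEF cs dict m) := by
  induction m with
  | zero => rfl
  | succ m ih =>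
    rw [List.range_succ, List.foldl_append, List.foldl_cons, List.foldl_nil, ih]
    dsimp only [List.map_append, List.map_cons, List.map_nil]
    rw [EF_succ]
    simp [List.map_append, EF_succ]

theorem boldB_eq_spec (cs : List Char) (dict : List String) :
    pvBoldStepB cs dict cs.length = pvSpecBold cs dict := by
  unfold pvBoldStepB
  rw [PySem.List.pyRange_zero_natCast, List.foldl_map]
  simp only [Int.toNat_natCast]
  rw [foldB_pair cs dict cs.length]
  unfold pvSpecBold
  apply List.map_congr_left
  intro i _
  exact entry_eq_cover cs dict i

-- ===== render equivalence =====

theorem outA_ref_ge (cs : List Char) (bold : List Bool) (n : Nat)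
    (hb : bold.length = n) (hc : cs.length = n) (i : Nat) (hi : ¬ i < n) :
    ((pvInnerA cs bold n i).1 ++ '<' :: '/' :: 'b' :: '>' :: pvOutA cs bold n (pvInnerA cs bold n i).2
        = pvRef true ((bold.zip cs).drop i))
    ∧ pvOutA cs bold n i = pvRef false ((bold.zip cs).drop i) := by
  have hz : (bold.zip cs).drop i = [] := by
    apply List.drop_eq_nil_of_le
    rw [List.length_zip, hb, hc]
    omega
  rw [hz, pvInnerA, dif_neg (fun h => hi h.1), pvOutA, dif_neg hi]
  exact ⟨rfl, rfl⟩

theorem outA_ref (cs : List Char) (bold : List Bool) (n : Nat)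
    (hb : bold.length = n) (hc : cs.length = n) :
    ∀ k i, n - i ≤ k →
      ((pvInnerA cs bold n i).1 ++ '<' :: '/' :: 'b' :: '>' :: pvOutA cs bold n (pvInnerA cs bold n i).2
          = pvRef true ((bold.zip cs).drop i))
      ∧ pvOutA cs bold n i = pvRef false ((bold.zip cs).drop i) := by
  intro k
  induction k with
  | zero =>
    intro i hi
    exact outA_ref_ge cs bold n hb hc i (by omega)
  | succ k ihk =>
    intro i hi
    by_cases hin : i < n
    · have hib : i < bold.length := by omega
      have hic : i < cs.length := by omega
      have hiz : i < (bold.zip cs).length := by rw [List.length_zip]; omega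
      have hd : (bold.zip cs).drop i
          = (bold[i]'hib, cs[i]'hic) :: (bold.zip cs).drop (i + 1) := by
        rw [List.drop_eq_getElem_cons hiz, List.getElem_zip]
      have hbg : bold.getD i false = bold[i]'hib := List.getD_eq_getElem bold false hib
      have hcg : cs.getD i ' ' = cs[i]'hic := List.getD_eq_getElem cs ' ' hic
      obtain ⟨ihQ, ihP⟩ := ihk (i + 1) (by omega)
      by_cases hbi : bold.getD i false = true
      · have hbi' : bold[i]'hib = true := by rw [← hbg]; exact hbi
        have hQ : (pvInnerA cs bold n i).1
            ++ '<' :: '/' :: 'b' :: '>' :: pvOutA cs bold n (pvInnerA cs bold n i).2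
            = pvRef true ((bold.zip cs).drop i) := by
          rw [pvInnerA, dif_pos ⟨hin, hbi⟩]
          dsimp only
          rw [hd]
          simp only [pvRef, hbi', if_pos, List.cons_append]
          rw [← hcg]
          exact congrArg _ ihQ
        refine ⟨hQ, ?_⟩
        rw [pvOutA, dif_pos hin, dif_pos hbi]
        dsimp only
        rw [hd] at hQ ⊢
        simp only [pvRef, hbi', if_pos] at hQ ⊢
        rw [← hcg] at hQ ⊢
        rw [hQ]
        simp
      · have hbF : bold.getD i false = false := by
          revert hbi; cases bold.getD i false <;> simp
        have hbi' : bold[i]'hib = false := by rw [← hbg]; exact hbF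
        have hP : pvOutA cs bold n i = pvRef false ((bold.zip cs).drop i) := by
          rw [pvOutA, dif_pos hin, dif_neg hbi]
          rw [ihP, hd]
          simp only [pvRef, hbi']
          rw [← hcg]
          simp
        refine ⟨?_, hP⟩
        rw [pvInnerA, dif_neg (fun h => hbi h.2)]
        dsimp only
        rw [hP, hd]
        simp only [pvRef, hbi']
        rw [← hcg]
        simp
    · exact outA_ref_ge cs bold n hb hc i hin

theorem renderB_flat (cs : List Char) (bold : List Bool) (n : Nat) :
    pvRenderB cs bold n = (List.range n).flatMap (pvPiece cs bold n) := by
  unfold pvRenderB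
  have hstep : (fun (acc : List Char) (i : Int) =>
      let acc := if bold.getD i.toNat false && (decide (i = 0) || !bold.getD (i.toNat - 1) false)
                 then acc ++ ['<', 'b', '>'] else acc
      let acc := acc ++ [cs.getD i.toNat ' ']
      if bold.getD i.toNat false && (decide (i + 1 = (n : Int)) || !bold.getD (i.toNat + 1) false)
      then acc ++ ['<', '/', 'b', '>'] else acc)
    = (fun acc i => acc ++
        ((if bold.getD i.toNat false && (decide (i = 0) || !bold.getD (i.toNat - 1) false)
          then ['<', 'b', '>'] else [])
         ++ [cs.getD i.toNat ' ']
         ++ (if bold.getD i.toNat false && (decide (i + 1 = (n : Int)) || !bold.getD (i.toNat + 1) false)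
             then ['<', '/', 'b', '>'] else []))) := by
    funext acc i
    dsimp only
    split_ifs <;> simp
  rw [hstep, PySem.List.foldl_append_eq_flatMap, List.nil_append,
      PySem.List.pyRange_zero_natCast, List.flatMap_map]
  apply List.flatMap_congr
  intro i _
  unfold pvPiece
  simp only [Int.toNat_natCast, Nat.cast_eq_zero]
  have hiff : ((i : Int) + 1 = (n : Int)) ↔ (i + 1 = n) := by
    constructor <;> intro h <;> omega
  simp [hiff]

theorem refR (cs : List Char) (bold : List Bool) (n : Nat)
    (hb : bold.length = n) (hc : cs.length = n) :
    ∀ m i, i ≤ n → n - i = m →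
    pvRef (pvPrev bold i) ((bold.zip cs).drop i)
      = (if pvPrev bold i && !(decide (i < n) && bold.getD i false) then ['<', '/', 'b', '>'] else [])
        ++ (List.range' i m).flatMap (pvPiece cs bold n) := by
  intro m
  induction m with
  | zero =>
    intro i hi hm
    have hieq : i = n := by omega
    have hz : (bold.zip cs).drop i = [] := by
      apply List.drop_eq_nil_of_le
      rw [List.length_zip, hb, hc]
      omega
    rw [hz]
    have hlt : decide (i < n) = false := by simp; omega
    cases hp : pvPrev bold i <;> simp [pvRef, hlt]
  | succ m ih =>
    intro i hi hm
    have hin : i < n := by omega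
    have hib : i < bold.length := by omega
    have hic : i < cs.length := by omega
    have hiz : i < (bold.zip cs).length := by rw [List.length_zip]; omega
    have hd : (bold.zip cs).drop i
        = (bold[i]'hib, cs[i]'hic) :: (bold.zip cs).drop (i + 1) := by
      rw [List.drop_eq_getElem_cons hiz, List.getElem_zip]
    have hbg : bold[i]'hib = bold.getD i false := (List.getD_eq_getElem bold false hib).symm
    have hcg : cs[i]'hic = cs.getD i ' ' := (List.getD_eq_getElem cs ' ' hic).symm
    have hps : pvPrev bold (i + 1) = bold.getD i false := by simp [pvPrev]
    have ihe := ih (i + 1) (by omega) (by omega)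
    rw [hps] at ihe
    have hrange : List.range' i (m + 1) = i :: List.range' (i + 1) m := List.range'_succ
    rw [hrange, List.flatMap_cons, hd]
    have hcb : (decide (i + 1 = n) || !bold.getD (i + 1) false)
        = !(decide (i + 1 < n) && bold.getD (i + 1) false) := by
      by_cases h1 : i + 1 = n
      · have h2 : decide (i + 1 = n) = true := by simp [h1]
        have h3 : decide (i + 1 < n) = false := by simp; omega
        rw [h2, h3]
        simp
      · have h2 : decide (i + 1 = n) = false := by simp [h1]
        have h3 : decide (i + 1 < n) = true := by simp; omega
        rw [h2, h3]
        simp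
    have hlt : decide (i < n) = true := by simp [hin]
    have hpiece : pvPiece cs bold n i
        = ((if bold.getD i false && (decide (i = 0) || !bold.getD (i - 1) false)
            then ['<', 'b', '>'] else [])
           ++ [cs.getD i ' ']
           ++ (if bold.getD i false && (decide (i + 1 = n) || !bold.getD (i + 1) false)
               then ['<', '/', 'b', '>'] else [])) := rfl
    have hop : (decide (i = 0) || !bold.getD (i - 1) false) = !pvPrev bold i := by
      by_cases h0 : i = 0 <;> simp [pvPrev, h0]
    rw [hpiece, hcb, hop]
    cases hp : pvPrev bold i <;> cases hbi : bold.getD i false <;>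
      rw [hbi] at ihe <;>
      simp only [pvRef, hbg, hbi, hp, hcg, hlt, Bool.true_and, Bool.false_and, Bool.and_true,
        Bool.and_false, Bool.not_true, Bool.not_false, Bool.true_or, Bool.false_or,
        Bool.or_true, Bool.or_false, Bool.false_eq_true, if_true, if_false, ite_true, ite_false,
        List.nil_append, List.append_nil, List.cons_append] <;>
      rw [ihe] <;>
      simp [List.append_assoc]

theorem renderB_ref (cs : List Char) (bold : List Bool) (n : Nat)
    (hb : bold.length = n) (hc : cs.length = n) :
    pvRenderB cs bold n = pvRef false (bold.zip cs) := by
  rw [renderB_flat, List.range_eq_range']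
  have h0 := refR cs bold n hb hc n 0 (by omega) (by omega)
  have hp0 : pvPrev bold 0 = false := by simp [pvPrev]
  rw [hp0] at h0
  have h0' : pvRef false (bold.zip cs) = List.flatMap (pvPiece cs bold n) (List.range' 0 n) := by
    simpa using h0
  exact h0'.symm

-- ===== VERDICT (by name: the statement is the Claim_ definition above) =====
theorem addBoldTag1_spec : Claim_equal_addBoldTag1 := by
  intro s dict _
  show addBoldTag1 s dict = addBoldTag1_alt s dict
  unfold addBoldTag1 addBoldTag1_alt
  dsimp only
  have hA := boldA_eq_spec s.toList dict
  have hB := boldB_eq_spec s.toList dict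
  rw [hA, hB]
  have hlen : (pvSpecBold s.toList dict).length = s.toList.length := by
    simp [pvSpecBold]
  rw [(outA_ref s.toList (pvSpecBold s.toList dict) s.toList.length hlen rfl
        (s.toList.length) 0 (by omega)).2,
      renderB_ref s.toList (pvSpecBold s.toList dict) s.toList.length hlen rfl]
  simp
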